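-- pv_equiv track=rewrite | github.com/isilanes/cocosolve | modules/core.py | manipulate
-- ===== SOURCE A (Python) =====
-- def manipulate(piece, flip, rot):
--     '''Returns piece (array of 16 0/1 elements), representing input piece
--     flipped (flip = 1) or not (flip = 0), and rotated rot times CCW.'''
--
--     # Copy original piece:
--     m = piece[:]
--
--     # Flip?
--     if flip:
--         m.reverse()
--         m = m[-5:] + m[:11]
--
--     # Rotate?:
--     for i in range(rot):
--         m = m[4:] + m[:4]
--
--     return m
-- ===== SOURCE B (Python) =====
-- def manipulate(piece, flip, rot):
--     '''Returns piece (array of 16 0/1 elements), representing input piece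
--     flipped (flip = 1) or not (flip = 0), and rotated rot times CCW.'''
--     # Flip as one composed permutation: reversed first 5, then reversed last 11.
--     m = piece[:5][::-1] + piece[-11:][::-1] if flip else piece[:]
--     # Net cyclic rotation in one shot instead of rot shifting passes.
--     n = len(m)
--     if n > 4 and rot > 0:
--         k = (4 * rot) % n
--         m = m[k:] + m[:k]
--     return m
-- ===== Notes on version B (the rewrite author's own statement) =====
-- stated objective: simpler
-- what changed: The rot-iteration shifting loop is replaced by a single closed-form cyclic slice with offset (4*rot) % len(m) (guarded for rot <= 0 and lists of length <= 4, where the shift is a no-op), and the flip is computed as one composed re-slice of the original list (reversed first 5 + reversed last 11) instead of reversing a copy and re-slicing it.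
import Mathlib
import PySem

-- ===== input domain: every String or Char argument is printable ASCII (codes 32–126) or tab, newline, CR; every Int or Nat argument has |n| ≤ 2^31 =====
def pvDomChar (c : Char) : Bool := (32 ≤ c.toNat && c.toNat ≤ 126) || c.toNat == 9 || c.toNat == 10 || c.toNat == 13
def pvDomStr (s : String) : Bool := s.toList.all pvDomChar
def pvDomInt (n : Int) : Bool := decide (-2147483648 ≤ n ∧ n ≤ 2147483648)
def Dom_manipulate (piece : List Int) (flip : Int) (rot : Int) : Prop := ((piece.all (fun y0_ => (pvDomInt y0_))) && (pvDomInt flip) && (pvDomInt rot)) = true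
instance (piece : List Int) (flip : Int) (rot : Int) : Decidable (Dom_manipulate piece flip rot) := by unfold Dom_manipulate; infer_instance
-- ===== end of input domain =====

-- B replaces A's rot-step shifting loop by one closed-form cyclic slice (and the flip by
-- one composed re-slice of the original list); objective: simpler (faster on large rot).

-- ===== PORT A =====
def manipulate (piece : List Int) (flip : Int) (rot : Int) : List Int :=
  -- m = piece[:]
  let m := PySem.List.slice piece none none
  -- if flip: m.reverse(); m = m[-5:] + m[:11]
  let m := if flip ≠ 0 then
      let r := m.reverse
      PySem.List.slice r (some (-5)) none ++ PySem.List.slice r none (some 11)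
    else m
  -- for i in range(rot): m = m[4:] + m[:4]
  (PySem.List.pyRange 0 rot 1).foldl
    (fun m _ => PySem.List.slice m (some 4) none ++ PySem.List.slice m none (some 4)) m

-- ===== PORT B =====
def manipulate_alt (piece : List Int) (flip : Int) (rot : Int) : List Int :=
  -- m = piece[:5][::-1] + piece[-11:][::-1] if flip else piece[:]
  let m := if flip ≠ 0 then
      (PySem.List.slice piece none (some 5)).reverse ++
        (PySem.List.slice piece (some (-11)) none).reverse
    else PySem.List.slice piece none none
  -- n = len(m); if n > 4 and rot > 0: k = (4*rot) % n; m = m[k:] + m[:k]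
  let n := PySem.List.len m
  if n > 4 ∧ rot > 0 then
    let k := PySem.Int.mod (4 * rot) n
    PySem.List.slice m (some k) none ++ PySem.List.slice m none (some k)
  else m

-- ===== PRECONDITION & SPEC =====
def Spec_manipulate (piece : List Int) (flip : Int) (rot : Int) (out : List Int) : Prop := out = manipulate_alt piece flip rot
instance (piece : List Int) (flip : Int) (rot : Int) (out : List Int) : Decidable (Spec_manipulate piece flip rot out) := by unfold Spec_manipulate; infer_instance

-- ===== CLAIM (what is proved, stated in full; the proofs are below) =====
def Claim_equal_manipulate : Prop := ∀ (piece : List Int) (flip : Int) (rot : Int), Dom_manipulate piece flip rot → Spec_manipulate piece flip rot (manipulate piece flip rot)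

-- ===== LEMMAS AND PROOFS =====

-- A's flipped list (slices of the reversed copy) equals B's composed re-slice of the original.
theorem flip_eq (piece : List Int) :
    PySem.List.slice piece.reverse (some (-5)) none ++ PySem.List.slice piece.reverse none (some 11)
      = (PySem.List.slice piece none (some 5)).reverse ++
          (PySem.List.slice piece (some (-11)) none).reverse := by
  rw [PySem.List.slice_from_neg_ofNat piece.reverse 5 (by norm_num),
      PySem.List.slice_from_neg_ofNat piece 11 (by norm_num),
      PySem.List.slice_to piece.reverse (b := 11) (by norm_num),
      PySem.List.slice_to piece (b := 5) (by norm_num)]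
  rw [List.reverse_take, List.reverse_drop]
  simp only [List.length_reverse]
  congr 1
  rcases le_or_gt 11 piece.length with h | h
  · rw [Nat.sub_sub_self h, (show Int.toNat 11 = 11 from rfl)]
  · have h0 : piece.length - 11 = 0 := by omega
    rw [(show Int.toNat 11 = 11 from rfl), h0, Nat.sub_zero]
    rw [List.take_of_length_le (by simp; omega), List.take_of_length_le (by simp)]

-- a 'for _ in range' fold of a state-only step is function iteration
theorem foldl_const_iterate {α β : Type} (f : α → α) :
    ∀ (l : List β) (m : α), l.foldl (fun m _ => f m) m = f^[l.length] m := by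
  intro l
  induction l with
  | nil => intro m; simp
  | cons x xs ih => intro m; simp [List.foldl_cons, ih, Function.iterate_succ_apply]

def rotStep (m : List Int) : List Int := m.drop 4 ++ m.take 4

theorem rotStep_short {m : List Int} (h : m.length ≤ 4) : rotStep m = m := by
  simp [rotStep, List.drop_eq_nil_of_le h, List.take_of_length_le h]

theorem rotStep_iterate_short {m : List Int} (h : m.length ≤ 4) (r : Nat) :
    rotStep^[r] m = m :=
  Function.iterate_fixed (rotStep_short h) r

theorem rotStep_iterate_long {m : List Int} (h : 4 < m.length) (r : Nat) :
    rotStep^[r] m = m.rotate (4 * r) := by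
  induction r with
  | zero => simp
  | succ r ih =>
    rw [Function.iterate_succ_apply', ih, rotStep,
        ← List.rotate_eq_drop_append_take (by rw [List.length_rotate]; omega),
        List.rotate_rotate]
    ring_nf

theorem slice_step_eq_rotStep (m : List Int) :
    PySem.List.slice m (some 4) none ++ PySem.List.slice m none (some 4) = rotStep m := by
  rw [PySem.List.slice_from m (a := 4) (by norm_num), PySem.List.slice_to m (b := 4) (by norm_num)]
  rfl

theorem manipulate_eq_alt (piece : List Int) (flip : Int) (rot : Int) :
    manipulate piece flip rot = manipulate_alt piece flip rot := by
  unfold manipulate manipulate_alt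
  simp only [PySem.List.slice_none_none]
  -- the two flip results coincide
  rw [show (if flip ≠ 0 then
        PySem.List.slice piece.reverse (some (-5)) none ++ PySem.List.slice piece.reverse none (some 11)
      else piece)
      = (if flip ≠ 0 then
        (PySem.List.slice piece none (some 5)).reverse ++ (PySem.List.slice piece (some (-11)) none).reverse
      else piece) from by rw [flip_eq]]
  set m : List Int := (if flip ≠ 0 then
      (PySem.List.slice piece none (some 5)).reverse ++ (PySem.List.slice piece (some (-11)) none).reverse
    else piece) with hm
  simp only [slice_step_eq_rotStep]
  rw [foldl_const_iterate rotStep (PySem.List.pyRange 0 rot 1) m,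
      PySem.List.length_pyRange_one]
  simp only [PySem.List.len_eq]
  rcases le_or_gt rot 0 with hrot | hrot
  · rw [show (rot - 0).toNat = 0 from by omega]
    simp only [Function.iterate_zero, id_eq]
    rw [if_neg]; rintro ⟨-, h2⟩; omega
  · rcases le_or_gt m.length 4 with hL | hL
    · rw [rotStep_iterate_short hL]
      rw [if_neg]; rintro ⟨h1, -⟩
      have : ((m.length : Int) ≤ 4) := by exact_mod_cast hL
      omega
    · rw [rotStep_iterate_long hL]
      rw [if_pos ⟨by exact_mod_cast hL, hrot⟩]
      have hLpos : (0 : Int) < (m.length : Int) := by exact_mod_cast Nat.lt_of_lt_of_le (by norm_num) hL.le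
      rw [PySem.Int.mod_eq_emod_of_pos hLpos]
      have h4 : (4 * rot) = ((4 * rot.toNat : Nat) : Int) := by push_cast; omega
      have hk : (4 * rot) % (m.length : Int) = ((4 * rot.toNat % m.length : Nat) : Int) := by
        rw [h4]; exact_mod_cast rfl
      rw [hk,
          PySem.List.slice_from m (by positivity),
          PySem.List.slice_to m (by positivity)]
      rw [show ((4 * rot.toNat % m.length : Nat) : Int).toNat = 4 * rot.toNat % m.length from by omega]
      rw [show (rot - 0).toNat = rot.toNat from by omega]
      exact List.rotate_eq_drop_append_take_mod

-- ===== VERDICT (by name: the statement is the Claim_ definition above) =====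
theorem manipulate_spec : Claim_equal_manipulate := by
  intro piece flip rot _
  unfold Spec_manipulate
  exact manipulate_eq_alt piece flip rot
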